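-- pv_equiv track=rewrite | github.com/tusharshinde05/Equip9 | question3.py | process_maintenance_logs
-- ===== SOURCE A (Python) =====
-- from bisect import bisect_left, bisect_right
--
-- class FenwickTree:
--     def __init__(self, size):
--         self.size = size
--         self.tree = [0] * (size + 1)
--
--     def update(self, index, value):
--         while index <= self.size:
--             self.tree[index] += value
--             index += index & -index
--
--     def query(self, index):
--         sum_val = 0
--         while index > 0:
--             sum_val += self.tree[index]
--             index -= index & -index
--         return sum_val
--
--     def range_query(self, left, right):
--         return self.query(right) - self.query(left - 1)
--
-- def process_maintenance_logs(maintenance_logs, queries):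
--     unique_dates = sorted(set(date for _, date, _ in maintenance_logs))
--     date_to_index = {date: i + 1 for i, date in enumerate(unique_dates)}
--
--     fenwick_tree = FenwickTree(len(unique_dates))
--
--     for _, date, cost in maintenance_logs:
--         fenwick_tree.update(date_to_index[date], cost)
--
--     results = []
--     for start_date, end_date in  queries:
--         left_idx = bisect_left(unique_dates, start_date) + 1
--         right_idx = bisect_right(unique_dates, end_date)
--         if left_idx <= right_idx and right_idx > 0:
--             results.append(fenwick_tree.range_query(left_idx, right_idx))
--         else:
--             results.append(0)
--
--     return results
-- ===== SOURCE B (Python) =====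
-- from bisect import bisect_left, bisect_right
--
-- def process_maintenance_logs(maintenance_logs, queries):
--     # Aggregate per-date totals, then answer each query with one prefix-sum
--     # subtraction over the sorted unique dates (no Fenwick tree).
--     totals = {}
--     for _, date, cost in maintenance_logs:
--         totals[date] = totals.get(date, 0) + cost
--     dates = sorted(totals)
--     prefix = [0]
--     for d in dates:
--         prefix.append(prefix[-1] + totals[d])
--     results = []
--     for start_date, end_date in queries:
--         lo = bisect_left(dates, start_date)
--         hi = bisect_right(dates, end_date)
--         results.append(prefix[hi] - prefix[lo] if lo < hi else 0)
--     return results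
-- ===== Notes on version B (the rewrite author's own statement) =====
-- stated objective: simpler
-- what changed: Replaces the FenwickTree class (bitwise-lowbit update/query loops and a rank dict) with a per-date totals dict and a single cumulative prefix-sum list over the sorted unique dates, so each log is aggregated by one dict update and each query is answered by one subtraction after the same two bisects.
import Mathlib
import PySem

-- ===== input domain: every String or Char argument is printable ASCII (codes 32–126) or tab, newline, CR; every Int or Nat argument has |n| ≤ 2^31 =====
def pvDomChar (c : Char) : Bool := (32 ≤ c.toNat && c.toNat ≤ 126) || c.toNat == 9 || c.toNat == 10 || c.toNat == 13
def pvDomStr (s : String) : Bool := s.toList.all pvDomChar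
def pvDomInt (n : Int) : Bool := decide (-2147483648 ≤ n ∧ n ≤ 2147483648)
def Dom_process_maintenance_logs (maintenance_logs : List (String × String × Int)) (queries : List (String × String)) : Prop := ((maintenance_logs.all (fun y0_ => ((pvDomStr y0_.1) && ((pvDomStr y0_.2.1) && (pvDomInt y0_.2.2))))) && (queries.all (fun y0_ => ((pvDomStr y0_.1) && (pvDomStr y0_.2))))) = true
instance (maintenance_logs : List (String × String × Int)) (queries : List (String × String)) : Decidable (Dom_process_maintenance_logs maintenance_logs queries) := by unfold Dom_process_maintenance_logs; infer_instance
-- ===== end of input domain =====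

-- B replaces A's Fenwick tree (bit-trick update/query loops) by a per-date total
-- dict plus one running prefix-sum list, answering each query by a single
-- subtraction after the same two bisects; simpler: the whole Fenwick class goes away.

-- ===== PORT A =====

-- `index & -index` in the Python is `PySem.Int.band index (-index)` (Python-exact).
-- The helpers below are cited by the termination proofs of the two loop ports.
def pvLowN (m : Nat) : Nat := m - (m &&& (m - 1))

theorem pvLowN_pos {m : Nat} (h : 1 ≤ m) : 1 ≤ pvLowN m := by
  have := Nat.and_le_right (n := m) (m := m - 1); unfold pvLowN; omega

theorem pvLowN_le (m : Nat) : pvLowN m ≤ m := by unfold pvLowN; omega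

theorem pvBand_eq_lowN (m : Nat) (h : 1 ≤ m) :
    PySem.Int.band (m : Int) (-(m : Int)) = (pvLowN m : Int) := by
  unfold PySem.Int.band
  rw [if_pos (by positivity), if_neg (by omega)]
  have e1 : ((m : Int)).toNat = m := Int.toNat_natCast m
  have e2 : (-(-(m : Int)) - 1).toNat = m - 1 := by omega
  rw [e1, e2]
  unfold pvLowN
  have := Nat.and_le_right (n := m) (m := m - 1)
  omega

theorem pvBand_lowbit_pos (i : Int) (h : 1 ≤ i) : 1 ≤ PySem.Int.band i (-i) := by
  have hi : i = ((i.toNat : Nat) : Int) := by omega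
  rw [hi, pvBand_eq_lowN i.toNat (by omega)]
  have := pvLowN_pos (m := i.toNat) (by omega); omega

theorem pvBand_lowbit_le (i : Int) (h : 1 ≤ i) : PySem.Int.band i (-i) ≤ i := by
  have hi : i = ((i.toNat : Nat) : Int) := by omega
  rw [hi, pvBand_eq_lowN i.toNat (by omega)]
  have := pvLowN_le i.toNat; omega

-- FenwickTree.update: `while index <= self.size: tree[index] += value; index += index & -index`.
-- The `1 ≤ index` conjunct only makes the recursion total: with index ≤ 0 the Python
-- loop would never terminate, and every actual call has index ≥ 1.
def pvFenUpdate (size : Int) (tree : List Int) (index value : Int) : List Int :=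
  if h : index ≤ size ∧ 1 ≤ index then
    pvFenUpdate size
      (PySem.List.pySetD tree index (PySem.List.pyGetD tree index 0 + value))
      (index + PySem.Int.band index (-index)) value
  else tree
termination_by (size + 1 - index).toNat
decreasing_by
  have h1 := pvBand_lowbit_pos index h.2
  omega

-- FenwickTree.query: `sum_val = 0; while index > 0: sum_val += tree[index]; index -= index & -index`.
def pvFenQueryLoop (tree : List Int) (sum_val index : Int) : Int :=
  if h : 0 < index then
    pvFenQueryLoop tree (sum_val + PySem.List.pyGetD tree index 0)
      (index - PySem.Int.band index (-index))
  else sum_val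
termination_by index.toNat
decreasing_by
  have h1 := pvBand_lowbit_pos index h
  have h2 := pvBand_lowbit_le index h
  omega

-- unique_dates = sorted(set(date for _, date, _ in maintenance_logs))
def pvUniqueDates (maintenance_logs : List (String × String × Int)) : List String :=
  PySem.List.sorted (PySem.Set.ofList (maintenance_logs.map (fun t => t.2.1))) (fun d => d) false

-- date_to_index = {date: i + 1 for i, date in enumerate(unique_dates)}
def pvDateToIndex (maintenance_logs : List (String × String × Int)) : PySem.Dict String Int :=
  (PySem.List.enumerate (pvUniqueDates maintenance_logs) 0).foldl
    (fun d p => d.insert p.2 (p.1 + 1)) PySem.Dict.empty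

-- the tree after __init__ ([0] * (size + 1)) and the update loop over the logs
-- (date_to_index[date] is always present; getD's default is never read)
def pvTreeAfterUpdates (maintenance_logs : List (String × String × Int)) : List Int :=
  maintenance_logs.foldl
    (fun t p => pvFenUpdate (PySem.List.len (pvUniqueDates maintenance_logs)) t
      ((pvDateToIndex maintenance_logs).getD p.2.1 0) p.2.2)
    (PySem.List.pyRepeat [(0 : Int)] (PySem.List.len (pvUniqueDates maintenance_logs) + 1))

def process_maintenance_logs (maintenance_logs : List (String × String × Int)) (queries : List (String × String)) : List Int :=
  queries.foldl
    (fun results q =>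
      let left_idx : Int := (PySem.List.bisectLeft (pvUniqueDates maintenance_logs) q.1 : Int) + 1
      let right_idx : Int := (PySem.List.bisectRight (pvUniqueDates maintenance_logs) q.2 : Int)
      if left_idx ≤ right_idx ∧ 0 < right_idx then
        -- range_query(left, right) = query(right) - query(left - 1)
        results ++ [pvFenQueryLoop (pvTreeAfterUpdates maintenance_logs) 0 right_idx -
                    pvFenQueryLoop (pvTreeAfterUpdates maintenance_logs) 0 (left_idx - 1)]
      else results ++ [0]) []

-- ===== PORT B =====

-- totals[date] = totals.get(date, 0) + cost
def pvTotals (maintenance_logs : List (String × String × Int)) : PySem.Dict String Int :=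
  maintenance_logs.foldl (fun d p => d.insert p.2.1 (d.getD p.2.1 0 + p.2.2)) PySem.Dict.empty

-- dates = sorted(totals)
def pvDates (maintenance_logs : List (String × String × Int)) : List String :=
  PySem.List.sorted (pvTotals maintenance_logs).keys (fun d => d) false

-- prefix = [0]; for d in dates: prefix.append(prefix[-1] + totals[d])
-- (totals[d] is always present; getD's default is never read)
def pvPrefix (maintenance_logs : List (String × String × Int)) : List Int :=
  (pvDates maintenance_logs).foldl
    (fun pre d => pre ++ [PySem.List.pyGetD pre (-1) 0 + (pvTotals maintenance_logs).getD d 0])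
    [(0 : Int)]

def process_maintenance_logs_alt (maintenance_logs : List (String × String × Int)) (queries : List (String × String)) : List Int :=
  queries.map (fun q =>
    let lo := PySem.List.bisectLeft (pvDates maintenance_logs) q.1
    let hi := PySem.List.bisectRight (pvDates maintenance_logs) q.2
    if lo < hi then
      PySem.List.pyGetD (pvPrefix maintenance_logs) (hi : Int) 0 -
      PySem.List.pyGetD (pvPrefix maintenance_logs) (lo : Int) 0
    else 0)

-- ===== PRECONDITION & SPEC =====
def Spec_process_maintenance_logs (maintenance_logs : List (String × String × Int)) (queries : List (String × String)) (out : List Int) : Prop := out = process_maintenance_logs_alt maintenance_logs queries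
instance (maintenance_logs : List (String × String × Int)) (queries : List (String × String)) (out : List Int) : Decidable (Spec_process_maintenance_logs maintenance_logs queries out) := by unfold Spec_process_maintenance_logs; infer_instance

-- ===== CLAIM (what is proved, stated in full; the proofs are below) =====
def Claim_equal_process_maintenance_logs : Prop := ∀ (maintenance_logs : List (String × String × Int)) (queries : List (String × String)), Dom_process_maintenance_logs maintenance_logs queries → Spec_process_maintenance_logs maintenance_logs queries (process_maintenance_logs maintenance_logs queries)

-- ===== LEMMAS AND PROOFS =====

-- ---- parity laws of the lowbit function ----

theorem pvAnd_pred_odd {m : Nat} (h : m % 2 = 1) : m &&& (m - 1) = m - 1 := by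
  apply Nat.eq_of_testBit_eq
  intro j
  rw [Nat.testBit_and]
  cases j with
  | zero =>
    simp only [Nat.testBit_zero]
    have : (m - 1) % 2 = 0 := by omega
    simp [h, this]
  | succ j =>
    simp only [Nat.testBit_add_one]
    have : m / 2 = (m - 1) / 2 := by omega
    rw [this, Bool.and_self]

theorem pvAnd_pred_even {m : Nat} (h : m % 2 = 0) (h1 : 1 ≤ m) :
    m &&& (m - 1) = 2 * ((m / 2) &&& (m / 2 - 1)) := by
  apply Nat.eq_of_testBit_eq
  intro j
  rw [Nat.testBit_and]
  cases j with
  | zero =>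
    simp only [Nat.testBit_zero]
    have h2 : (2 * (m / 2 &&& (m / 2 - 1))) % 2 = 0 := by omega
    simp [h, h2]
  | succ j =>
    simp only [Nat.testBit_add_one]
    have e1 : (m - 1) / 2 = m / 2 - 1 := by omega
    have e2 : 2 * (m / 2 &&& (m / 2 - 1)) / 2 = m / 2 &&& (m / 2 - 1) := by omega
    rw [e1, e2, ← Nat.testBit_and, Nat.testBit_and]

theorem pvLowN_odd {m : Nat} (h : m % 2 = 1) : pvLowN m = 1 := by
  unfold pvLowN; rw [pvAnd_pred_odd h]; omega

theorem pvLowN_even {m : Nat} (h : m % 2 = 0) (h1 : 1 ≤ m) : pvLowN m = 2 * pvLowN (m / 2) := by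
  unfold pvLowN
  rw [pvAnd_pred_even h h1]
  have h2 := Nat.and_le_right (n := m / 2) (m := m / 2 - 1)
  omega

theorem pvSub_lowN_even (m : Nat) : (m - pvLowN m) % 2 = 0 := by
  rcases Nat.eq_zero_or_pos m with h | h
  · subst h; simp [pvLowN]
  · rcases Nat.mod_two_eq_zero_or_one m with hm | hm
    · have e := pvLowN_even hm h
      have h2 := pvLowN_le (m / 2)
      omega
    · rw [pvLowN_odd hm]; omega

-- ---- the two Fenwick path-structure facts ----

-- one step from inside (k - low k, k) stays ≤ k
theorem pvStep_le {j k : Nat} (h1 : k - pvLowN k < j) (h2 : j < k) : j + pvLowN j ≤ k := by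
  induction k using Nat.strong_induction_on generalizing j with
  | _ k IH =>
  rcases Nat.eq_zero_or_pos j with hj0 | hj0
  · subst hj0
    have := pvLowN_le k; omega
  rcases Nat.mod_two_eq_zero_or_one j with hj2 | hj2
  · rcases Nat.mod_two_eq_zero_or_one k with hk2 | hk2
    · -- both even: halve
      have ek := pvLowN_even hk2 (by omega)
      have ej := pvLowN_even hj2 hj0
      have hL := pvLowN_le (k / 2)
      have := IH (k / 2) (by omega) (j := j / 2) (by omega) (by omega)
      omega
    · -- k odd: the interval (k-1, k) is empty
      rw [pvLowN_odd hk2] at h1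
      omega
  · -- j odd
    rw [pvLowN_odd hj2]
    omega

-- one step from [1, k - low k] never lands inside (k - low k, k]
theorem pvStep_skip {j k : Nat} (hj : 1 ≤ j) (h : j ≤ k - pvLowN k) :
    ¬ (k - pvLowN k < j + pvLowN j ∧ j + pvLowN j ≤ k) := by
  induction k using Nat.strong_induction_on generalizing j with
  | _ k IH =>
  rintro ⟨c1, c2⟩
  rcases Nat.mod_two_eq_zero_or_one j with hj2 | hj2
  · rcases Nat.mod_two_eq_zero_or_one k with hk2 | hk2
    · have hk1 : 1 ≤ k := by omega
      have ek := pvLowN_even hk2 hk1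
      have ej := pvLowN_even hj2 hj
      have hLk := pvLowN_le (k / 2)
      exact IH (k / 2) (by omega) (j := j / 2) (by omega) (by omega) ⟨by omega, by omega⟩
    · -- k odd: j + low j = k is impossible by parity
      have ej := pvLowN_even hj2 hj
      rw [pvLowN_odd hk2] at c1 h
      omega
  · -- j odd: forces j = k - low k, but k - low k is even
    rw [pvLowN_odd hj2] at c1 c2
    have he := pvSub_lowN_even k
    omega

-- membership-step equivalence used by the update/query exchange
theorem pvCond_step {j k : Nat} (hj : 1 ≤ j) (hne : j ≠ k) :
    (k - pvLowN k < j ∧ j ≤ k) ↔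
      (k - pvLowN k < j + pvLowN j ∧ j + pvLowN j ≤ k) := by
  constructor
  · rintro ⟨h1, h2⟩
    have h2' : j < k := lt_of_le_of_ne h2 hne
    exact ⟨lt_of_lt_of_le h1 (by have := pvLowN_pos hj; omega), pvStep_le h1 h2'⟩
  · rintro ⟨h1, h2⟩
    by_cases hle : k - pvLowN k < j
    · have hjj := pvLowN_pos hj
      refine ⟨hle, ?_⟩; omega
    · exact absurd ⟨h1, h2⟩ (pvStep_skip hj (by omega))

-- ---- Fenwick update: effect on one cell ----

theorem pvFenUpdate_length (size : Int) (tree : List Int) (index value : Int) :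
    (pvFenUpdate size tree index value).length = tree.length := by
  fun_induction pvFenUpdate with
  | case1 t i h ih =>
    rw [ih]
    have hc : i = ((i.toNat : Nat) : Int) := by omega
    rw [hc, PySem.List.pySetD_natCast, List.length_set]
  | case2 => rfl

theorem pvFenUpdate_getD_aux (n : Nat) (v : Int) (k : Nat) (hk : k ≤ n) :
    ∀ (fuel : Nat) (t : List Int) (j : Nat), t.length = n + 1 → 1 ≤ j → n + 1 - j ≤ fuel →
    (pvFenUpdate (n : Int) t (j : Int) v).getD k 0 =
      t.getD k 0 + if k - pvLowN k < j ∧ j ≤ k then v else 0 := by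
  intro fuel
  induction fuel with
  | zero =>
    intro t j ht hj hfuel
    rw [pvFenUpdate, dif_neg (by push_cast; omega)]
    rw [if_neg (by omega)]; ring
  | succ fuel IH =>
    intro t j ht hj hfuel
    by_cases hjn : j ≤ n
    · rw [pvFenUpdate, dif_pos (by constructor <;> push_cast <;> omega)]
      rw [pvBand_eq_lowN j hj, PySem.List.pyGetD_natCast]
      have hcast : (j : Int) + (pvLowN j : Int) = ((j + pvLowN j : Nat) : Int) := by push_cast; ring
      have hset : PySem.List.pySetD t (j : Int) (t.getD j 0 + v) = t.set j (t.getD j 0 + v) :=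
        PySem.List.pySetD_natCast t j _
      rw [hcast, hset]
      have hjp := pvLowN_pos hj
      rw [IH (t.set j (t.getD j 0 + v)) (j + pvLowN j) (by rw [List.length_set]; exact ht) (by omega) (by omega)]
      have hsetD : ∀ m : Nat, (t.set j (t.getD j 0 + v)).getD m 0 =
          if j = m then t.getD j 0 + v else t.getD m 0 := by
        intro m
        rw [List.getD_eq_getElem?_getD, List.getElem?_set]
        by_cases hm : j = m
        · subst hm; rw [if_pos rfl, if_pos rfl, if_pos (by omega)]; rfl
        · rw [if_neg hm, if_neg hm, ← List.getD_eq_getElem?_getD]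
      by_cases hkj : j = k
      · subst hkj
        rw [hsetD j, if_pos rfl]
        split_ifs <;> omega
      · rw [hsetD k, if_neg (by omega : ¬ j = k)]
        have hstep := pvCond_step hj hkj
        split_ifs <;> omega
    · rw [pvFenUpdate, dif_neg (by push_cast; omega)]
      rw [if_neg (by omega)]; ring

theorem pvFenUpdate_getD (n : Nat) (t : List Int) (j : Nat) (v : Int)
    (ht : t.length = n + 1) (hj : 1 ≤ j) (k : Nat) (hk : k ≤ n) :
    (pvFenUpdate (n : Int) t (j : Int) v).getD k 0 =
      t.getD k 0 + if k - pvLowN k < j ∧ j ≤ k then v else 0 :=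
  pvFenUpdate_getD_aux n v k hk (n + 1 - j) t j ht hj (le_refl _)

-- ---- Fenwick query ----

theorem pvFenQueryLoop_acc_aux (tree : List Int) :
    ∀ (m : Nat) (i : Int), i.toNat ≤ m → ∀ a, pvFenQueryLoop tree a i = a + pvFenQueryLoop tree 0 i := by
  intro m
  induction m with
  | zero =>
    intro i hi a
    rw [pvFenQueryLoop, dif_neg (by omega)]
    rw [pvFenQueryLoop, dif_neg (by omega)]
    ring
  | succ m IH =>
    intro i hi a
    by_cases h : 0 < i
    · have h1 := pvBand_lowbit_pos i h
      have h2 := pvBand_lowbit_le i h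
      rw [pvFenQueryLoop, dif_pos h]
      conv_rhs => rw [pvFenQueryLoop, dif_pos h]
      rw [IH _ (by omega), IH _ (by omega) (0 + PySem.List.pyGetD tree i 0)]
      ring
    · rw [pvFenQueryLoop, dif_neg h]
      conv_rhs => rw [pvFenQueryLoop, dif_neg h]
      ring

theorem pvFenQueryLoop_acc (tree : List Int) (a index : Int) :
    pvFenQueryLoop tree a index = a + pvFenQueryLoop tree 0 index :=
  pvFenQueryLoop_acc_aux tree index.toNat index (le_refl _) a

theorem pvFenQueryLoop_step (tree : List Int) (i : Nat) (h : 1 ≤ i) :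
    pvFenQueryLoop tree 0 (i : Int) =
      tree.getD i 0 + pvFenQueryLoop tree 0 ((i - pvLowN i : Nat) : Int) := by
  rw [pvFenQueryLoop, dif_pos (by positivity)]
  rw [pvBand_eq_lowN i h, PySem.List.pyGetD_natCast]
  have hle := pvLowN_le i
  have hcast : (i : Int) - (pvLowN i : Int) = ((i - pvLowN i : Nat) : Int) := by
    push_cast [hle]; ring
  rw [hcast, pvFenQueryLoop_acc]
  ring

theorem pvFenQueryLoop_zero (tree : List Int) : pvFenQueryLoop tree 0 0 = 0 := by
  rw [pvFenQueryLoop, dif_neg (by omega)]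

theorem pvFenQueryLoop_zero_tree (n : Nat) (i : Nat) (hi : i ≤ n) :
    pvFenQueryLoop (List.replicate (n + 1) (0 : Int)) 0 (i : Int) = 0 := by
  induction i using Nat.strong_induction_on with
  | _ i IH =>
  rcases Nat.eq_zero_or_pos i with h0 | h0
  · subst h0; exact_mod_cast pvFenQueryLoop_zero _
  · rw [pvFenQueryLoop_step _ i h0]
    have hp := pvLowN_pos h0
    rw [IH (i - pvLowN i) (by omega) (by omega)]
    rw [List.getD_replicate _ (by omega)]
    ring

-- query after one update: the value moves iff j ≤ i
theorem pvFenQuery_update (n : Nat) (t : List Int) (j : Nat) (v : Int)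
    (ht : t.length = n + 1) (hj : 1 ≤ j) (i : Nat) (hi : i ≤ n) :
    pvFenQueryLoop (pvFenUpdate (n : Int) t (j : Int) v) 0 (i : Int) =
      pvFenQueryLoop t 0 (i : Int) + if j ≤ i then v else 0 := by
  induction i using Nat.strong_induction_on with
  | _ i IH =>
  rcases Nat.eq_zero_or_pos i with h0 | h0
  · subst h0
    have z1 : pvFenQueryLoop (pvFenUpdate (n : Int) t (j : Int) v) 0 ((0:Nat) : Int) = 0 := by
      exact_mod_cast pvFenQueryLoop_zero _
    have z2 : pvFenQueryLoop t 0 ((0:Nat) : Int) = 0 := by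
      exact_mod_cast pvFenQueryLoop_zero _
    rw [z1, z2, if_neg (by omega)]; ring
  · rw [pvFenQueryLoop_step _ i h0, pvFenQueryLoop_step t i h0]
    have hp := pvLowN_pos h0
    have hle := pvLowN_le i
    rw [IH (i - pvLowN i) (by omega) (by omega)]
    rw [pvFenUpdate_getD n t j v ht hj i hi]
    by_cases hji : j = i
    · subst hji
      rw [if_pos ⟨by omega, le_refl j⟩, if_neg (by omega), if_pos (le_refl j)]
      ring
    · have hcc := pvCond_step (j := j) (k := i) hj hji
      split_ifs <;> omega

-- ---- per-query content of A's tree and of B's prefix list ----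

-- sum of the costs of the logs whose date has rank < i in ud
def pvCostSum (logs : List (String × String × Int)) (ud : List String) (i : Nat) : Int :=
  ((logs.filter (fun p => decide (ud.idxOf p.2.1 < i))).map (fun p => p.2.2)).sum

theorem pvCostSum_zero (logs : List (String × String × Int)) (ud : List String) :
    pvCostSum logs ud 0 = 0 := by
  unfold pvCostSum
  have : logs.filter (fun p => decide (ud.idxOf p.2.1 < 0)) = [] := by
    apply List.filter_eq_nil_iff.2
    intro p _
    simp
  rw [this]; rfl

theorem pvCostSum_cons (p : String × String × Int) (l : List (String × String × Int))
    (ud : List String) (i : Nat) :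
    pvCostSum (p :: l) ud i =
      (if ud.idxOf p.2.1 < i then p.2.2 else 0) + pvCostSum l ud i := by
  unfold pvCostSum
  by_cases h : ud.idxOf p.2.1 < i
  · rw [List.filter_cons_of_pos (by simpa using h), if_pos h, List.map_cons, List.sum_cons]
  · rw [List.filter_cons_of_neg (by simpa using h), if_neg h]
    ring

theorem pvCostSum_succ (logs : List (String × String × Int)) (ud : List String)
    (hnd : ud.Nodup) (hmem : ∀ p ∈ logs, p.2.1 ∈ ud) (i : Nat) (hi : i < ud.length) :
    pvCostSum logs ud (i + 1) =
      pvCostSum logs ud i + ((logs.filter (fun p => p.2.1 == ud[i])).map (fun p => p.2.2)).sum := by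
  unfold pvCostSum
  induction logs with
  | nil => simp
  | cons p l IH =>
    have hmem' : ∀ q ∈ l, q.2.1 ∈ ud := fun q hq => hmem q (List.mem_cons_of_mem p hq)
    have hp : p.2.1 ∈ ud := hmem p List.mem_cons_self
    have hIH := IH hmem'
    have hiff : ud.idxOf p.2.1 = i ↔ p.2.1 = ud[i] := by
      constructor
      · intro h
        have := List.getElem_idxOf (x := p.2.1) (xs := ud) (by rw [h]; exact hi)
        simpa [h] using this.symm
      · intro h
        rw [h]
        exact hnd.idxOf_getElem i hi
    by_cases hcase : ud.idxOf p.2.1 = i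
    · rw [List.filter_cons_of_pos (by simp; omega),
          List.filter_cons_of_neg (by simp; omega),
          List.filter_cons_of_pos (by simp [hiff.1 hcase])]
      simp only [List.map_cons, List.sum_cons]
      rw [hIH]; ring
    · by_cases hlt : ud.idxOf p.2.1 < i
      · rw [List.filter_cons_of_pos (by simp; omega),
            List.filter_cons_of_pos (by simp; omega),
            List.filter_cons_of_neg (by simp; intro h; exact absurd (hiff.2 h) hcase)]
        simp only [List.map_cons, List.sum_cons]
        rw [hIH]; ring
      · rw [List.filter_cons_of_neg (by simp; omega),
            List.filter_cons_of_neg (by simp; omega),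
            List.filter_cons_of_neg (by simp; intro h; exact absurd (hiff.2 h) hcase)]
        rw [hIH]

-- A's date_to_index dict maps d to (rank of d in ud) + 1
theorem pvEnumIndex_getD (ud : List String) (hnd : ud.Nodup) (d : String) (hd : d ∈ ud) :
    ((PySem.List.enumerate ud 0).foldl (fun dd p => dd.insert p.2 (p.1 + 1)) PySem.Dict.empty).getD d 0
      = (ud.idxOf d : Int) + 1 := by
  have hitems := PySem.Dict.items_foldl_insert_fresh (l := PySem.List.enumerate ud 0)
    (k := fun p => p.2) (v := fun p => p.1 + 1) (d := PySem.Dict.empty)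
    (by intro a ha; exact PySem.Dict.contains_empty _)
    (by rw [PySem.List.map_snd_enumerate]; exact hnd)
  have hk : ud.idxOf d < ud.length := List.idxOf_lt_length_of_mem hd
  have hmem : ((d, (ud.idxOf d : Int) + 1)) ∈
      ((PySem.List.enumerate ud 0).foldl (fun dd p => dd.insert p.2 (p.1 + 1)) PySem.Dict.empty).items := by
    rw [hitems]
    refine List.mem_append_right _ ?_
    refine List.mem_map.2 ⟨((ud.idxOf d : Int), d), ?_, by simp⟩
    rw [PySem.List.mem_enumerate_iff]
    exact ⟨ud.idxOf d, hk, by simp [List.getElem_idxOf]⟩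
  have hnk : ((PySem.List.enumerate ud 0).foldl (fun dd p => dd.insert p.2 (p.1 + 1)) PySem.Dict.empty).keys.Nodup :=
    PySem.Dict.nodup_keys_foldl_insert_key (PySem.List.enumerate ud 0) (fun p => p.2)
      (fun _ p => p.1 + 1) PySem.Dict.empty (by rw [PySem.Dict.keys_empty]; exact List.nodup_nil)
  exact PySem.Dict.getD_of_mem_items _ hmem hnk 0

-- B's totals dict maps v to the summed cost of the logs dated v
theorem pvTotals_getD_aux (l : List (String × String × Int)) :
    ∀ (dd : PySem.Dict String Int) (v : String),
    (l.foldl (fun d p => d.insert p.2.1 (d.getD p.2.1 0 + p.2.2)) dd).getD v 0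
      = dd.getD v 0 + ((l.filter (fun p => p.2.1 == v)).map (fun p => p.2.2)).sum := by
  induction l with
  | nil => intro dd v; simp
  | cons p l IH =>
    intro dd v
    rw [List.foldl_cons, IH]
    rw [PySem.Dict.getD_insert]
    by_cases hv : v = p.2.1
    · rw [if_pos hv, List.filter_cons_of_pos (by simp [hv]), List.map_cons, List.sum_cons, hv]
      ring
    · rw [if_neg hv, List.filter_cons_of_neg (by simp; exact fun h => hv h.symm)]

-- query of the tree after the whole update loop
theorem pvQuery_tree (ud : List String) (d2i : PySem.Dict String Int)
    (hd2i : ∀ d ∈ ud, d2i.getD d 0 = (ud.idxOf d : Int) + 1) :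
    ∀ (l : List (String × String × Int)), (∀ p ∈ l, p.2.1 ∈ ud) → ∀ (t : List Int),
      t.length = ud.length + 1 → ∀ (i : Nat), i ≤ ud.length →
    pvFenQueryLoop (l.foldl (fun t p => pvFenUpdate (ud.length : Int) t (d2i.getD p.2.1 0) p.2.2) t) 0 (i : Int)
      = pvFenQueryLoop t 0 (i : Int) + pvCostSum l ud i := by
  intro l
  induction l with
  | nil =>
    intro _ t ht i hi
    have hz : pvCostSum [] ud i = 0 := by unfold pvCostSum; simp
    rw [List.foldl_nil, hz]; ring
  | cons p l IH =>
    intro hl t ht i hi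
    have hp : p.2.1 ∈ ud := hl p List.mem_cons_self
    have hl' : ∀ q ∈ l, q.2.1 ∈ ud := fun q hq => hl q (List.mem_cons_of_mem p hq)
    rw [List.foldl_cons]
    have hidx := hd2i p.2.1 hp
    have hcast : (ud.idxOf p.2.1 : Int) + 1 = ((ud.idxOf p.2.1 + 1 : Nat) : Int) := by push_cast; ring
    rw [IH hl' _ (by rw [pvFenUpdate_length]; exact ht) i hi]
    rw [hidx, hcast]
    rw [pvFenQuery_update ud.length t (ud.idxOf p.2.1 + 1) p.2.2 ht (by omega) i hi]
    rw [pvCostSum_cons]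
    have : (ud.idxOf p.2.1 + 1 ≤ i) ↔ (ud.idxOf p.2.1 < i) := by omega
    by_cases hc : ud.idxOf p.2.1 < i
    · rw [if_pos (by omega), if_pos hc]; ring
    · rw [if_neg (by omega), if_neg hc]; ring

-- B's prefix list as a scan
def pvScan (f : String → Int) : List String → Int → List Int
  | [], _ => []
  | d :: ds, a => (a + f d) :: pvScan f ds (a + f d)

theorem pvFoldPrefix (f : String → Int) :
    ∀ (ds : List String) (init : List Int) (a : Int), PySem.List.pyGetD init (-1) 0 = a →
    ds.foldl (fun pre d => pre ++ [PySem.List.pyGetD pre (-1) 0 + f d]) init = init ++ pvScan f ds a := by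
  intro ds
  induction ds with
  | nil => intro init a _; simp [pvScan]
  | cons d ds IH =>
    intro init a ha
    rw [List.foldl_cons, ha]
    rw [IH (init ++ [a + f d]) (a + f d) (PySem.List.pyGetD_neg_one_append_singleton init _ 0)]
    simp [pvScan]

theorem pvScan_getD (f : String → Int) :
    ∀ (ds : List String) (a : Int) (i : Nat), i ≤ ds.length →
    ((a :: pvScan f ds a).getD i 0) = a + ((ds.take i).map f).sum := by
  intro ds
  induction ds with
  | nil =>
    intro a i hi
    simp only [List.length_nil, Nat.le_zero] at hi
    subst hi
    simp [pvScan]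
  | cons d ds IH =>
    intro a i hi
    cases i with
    | zero => simp
    | succ i =>
      rw [List.take_succ_cons, List.map_cons, List.sum_cons]
      have : (a :: pvScan f (d :: ds) a).getD (i + 1) 0 = ((a + f d) :: pvScan f ds (a + f d)).getD i 0 := by
        simp [pvScan]
      rw [this, IH (a + f d) i (by simpa using hi)]
      ring

-- prefix sums of the per-date totals are the rank-window cost sums
theorem pvExchange (logs : List (String × String × Int)) (ud : List String)
    (hnd : ud.Nodup) (hmem : ∀ p ∈ logs, p.2.1 ∈ ud) :
    ∀ (i : Nat), i ≤ ud.length →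
    ((ud.take i).map (fun d => ((logs.filter (fun p => p.2.1 == d)).map (fun p => p.2.2)).sum)).sum
      = pvCostSum logs ud i := by
  intro i
  induction i with
  | zero => intro _; rw [List.take_zero, pvCostSum_zero]; rfl
  | succ i IH =>
    intro hi
    rw [List.take_add_one, List.getElem?_eq_getElem (by omega)]
    rw [List.map_append, List.sum_append]
    rw [IH (by omega), pvCostSum_succ logs ud hnd hmem i (by omega)]
    simp

-- bound for Python's bisect on any list
theorem pvBisectLeftLoop_le {α : Type} [LT α] [DecidableLT α] (xs : List α) (x : α) :
    ∀ (fuel lo hi : Nat), lo ≤ hi → PySem.List.bisectLeftLoop xs x fuel lo hi ≤ hi := by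
  intro fuel
  induction fuel with
  | zero => intro lo hi h; simpa [PySem.List.bisectLeftLoop] using h
  | succ fuel IH =>
    intro lo hi h
    rw [PySem.List.bisectLeftLoop]
    by_cases hlt : lo < hi
    · rw [if_pos hlt]
      cases hget : xs[(lo + hi) / 2]? with
      | none => simpa using h
      | some y =>
        simp only
        by_cases hy : y < x
        · rw [if_pos hy]
          exact IH ((lo + hi) / 2 + 1) hi (by omega)
        · rw [if_neg hy]
          exact le_trans (IH lo ((lo + hi) / 2) (by omega)) (by omega)
    · rw [if_neg hlt]; exact h

theorem pvBisectRightLoop_le {α : Type} [LT α] [DecidableLT α] (xs : List α) (x : α) :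
    ∀ (fuel lo hi : Nat), lo ≤ hi → PySem.List.bisectRightLoop xs x fuel lo hi ≤ hi := by
  intro fuel
  induction fuel with
  | zero => intro lo hi h; simpa [PySem.List.bisectRightLoop] using h
  | succ fuel IH =>
    intro lo hi h
    rw [PySem.List.bisectRightLoop]
    by_cases hlt : lo < hi
    · rw [if_pos hlt]
      cases hget : xs[(lo + hi) / 2]? with
      | none => simpa using h
      | some y =>
        simp only
        by_cases hy : x < y
        · rw [if_pos hy]
          exact le_trans (IH lo ((lo + hi) / 2) (by omega)) (by omega)
        · rw [if_neg hy]
          exact IH ((lo + hi) / 2 + 1) hi (by omega)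
    · rw [if_neg hlt]; exact h

theorem pvBisectLeft_le {α : Type} [LT α] [DecidableLT α] (xs : List α) (x : α) :
    PySem.List.bisectLeft xs x ≤ xs.length :=
  pvBisectLeftLoop_le xs x xs.length 0 xs.length (by omega)

theorem pvBisectRight_le {α : Type} [LT α] [DecidableLT α] (xs : List α) (x : α) :
    PySem.List.bisectRight xs x ≤ xs.length :=
  pvBisectRightLoop_le xs x xs.length 0 xs.length (by omega)

-- a loop that appends one value per element, chosen by a test, is a map
theorem pvFoldIf {α : Type} (c : α → Prop) [DecidablePred c] (g : α → Int) (l : List α) :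
    l.foldl (fun results q => if c q then results ++ [g q] else results ++ [0]) [] =
      l.map (fun q => if c q then g q else 0) := by
  have hfun : (fun (results : List Int) q => if c q then results ++ [g q] else results ++ [0])
      = fun results q => results ++ [if c q then g q else 0] := by
    funext results q; split_ifs <;> rfl
  rw [hfun, PySem.List.foldl_append_singleton_eq_map, List.nil_append]

-- ===== VERDICT (by name: the statement is the Claim_ definition above) =====
theorem process_maintenance_logs_spec : Claim_equal_process_maintenance_logs := by
  unfold Claim_equal_process_maintenance_logs
  intro logs queries _dom
  unfold Spec_process_maintenance_logs
  -- shared facts about the sorted unique-date list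
  have hnd : (pvUniqueDates logs).Nodup := by
    have hperm := PySem.List.sorted_perm (PySem.Set.ofList (logs.map (fun t => t.2.1))) (fun d => d) false
    exact hperm.nodup_iff.2 (PySem.Set.nodup_ofList _)
  have hmem : ∀ p ∈ logs, p.2.1 ∈ pvUniqueDates logs := by
    intro p hp
    unfold pvUniqueDates
    have hperm := PySem.List.sorted_perm (PySem.Set.ofList (logs.map (fun t => t.2.1))) (fun d => d) false
    rw [hperm.mem_iff, PySem.Set.mem_ofList]
    exact List.mem_map.2 ⟨p, hp, rfl⟩
  have hdates : pvDates logs = pvUniqueDates logs := by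
    unfold pvDates pvTotals pvUniqueDates
    rw [PySem.Dict.keys_foldl_insert_key logs (fun p => p.2.1)
      (fun d p => d.getD p.2.1 0 + p.2.2) PySem.Dict.empty]
    rw [PySem.Dict.keys_empty, PySem.Set.update_nil_left]
  have hd2i : ∀ d ∈ pvUniqueDates logs,
      (pvDateToIndex logs).getD d 0 = ((pvUniqueDates logs).idxOf d : Int) + 1 := by
    intro d hd
    exact pvEnumIndex_getD (pvUniqueDates logs) hnd d hd
  -- the tree built by A answers rank-window cost sums
  have hquery : ∀ i : Nat, i ≤ (pvUniqueDates logs).length →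
      pvFenQueryLoop (pvTreeAfterUpdates logs) 0 (i : Int) = pvCostSum logs (pvUniqueDates logs) i := by
    intro i hi
    unfold pvTreeAfterUpdates
    simp only [PySem.List.len_eq]
    have ht0 : PySem.List.pyRepeat [(0 : Int)] (((pvUniqueDates logs).length : Int) + 1)
        = List.replicate ((pvUniqueDates logs).length + 1) (0 : Int) := by
      rw [PySem.List.pyRepeat_singleton]
      congr 1

    rw [ht0]
    rw [pvQuery_tree (pvUniqueDates logs) (pvDateToIndex logs) hd2i logs hmem _
      (by rw [List.length_replicate]) i hi]
    rw [pvFenQueryLoop_zero_tree (pvUniqueDates logs).length i hi]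
    ring
  -- the prefix list built by B answers the same sums
  have hpref : ∀ i : Nat, i ≤ (pvUniqueDates logs).length →
      (pvPrefix logs).getD i 0 = pvCostSum logs (pvUniqueDates logs) i := by
    intro i hi
    unfold pvPrefix
    rw [hdates]
    rw [pvFoldPrefix (fun d => (pvTotals logs).getD d 0) (pvUniqueDates logs) [(0 : Int)] 0 (by decide)]
    rw [List.singleton_append]
    rw [pvScan_getD (fun d => (pvTotals logs).getD d 0) (pvUniqueDates logs) 0 i hi]
    have hf : ∀ d : String, (pvTotals logs).getD d 0
        = ((logs.filter (fun p => p.2.1 == d)).map (fun p => p.2.2)).sum := by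
      intro d
      unfold pvTotals
      rw [pvTotals_getD_aux logs PySem.Dict.empty d, PySem.Dict.getD_empty]
      ring
    have hmapf : (((pvUniqueDates logs).take i).map (fun d => (pvTotals logs).getD d 0))
        = ((pvUniqueDates logs).take i).map
            (fun d => ((logs.filter (fun p => p.2.1 == d)).map (fun p => p.2.2)).sum) := by
      apply List.map_congr_left
      intro d _
      exact hf d
    rw [hmapf, pvExchange logs (pvUniqueDates logs) hnd hmem i hi]
    ring
  -- both programs are a per-query map
  have hA : process_maintenance_logs logs queries
      = queries.map (fun q =>
          if ((PySem.List.bisectLeft (pvUniqueDates logs) q.1 : Int) + 1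
                ≤ (PySem.List.bisectRight (pvUniqueDates logs) q.2 : Int)
              ∧ 0 < (PySem.List.bisectRight (pvUniqueDates logs) q.2 : Int)) then
            pvFenQueryLoop (pvTreeAfterUpdates logs) 0 (PySem.List.bisectRight (pvUniqueDates logs) q.2 : Int) -
            pvFenQueryLoop (pvTreeAfterUpdates logs) 0 ((PySem.List.bisectLeft (pvUniqueDates logs) q.1 : Int) + 1 - 1)
          else 0) := by
    have h0 : process_maintenance_logs logs queries
        = queries.foldl (fun results q =>
            if ((PySem.List.bisectLeft (pvUniqueDates logs) q.1 : Int) + 1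
                  ≤ (PySem.List.bisectRight (pvUniqueDates logs) q.2 : Int)
                ∧ 0 < (PySem.List.bisectRight (pvUniqueDates logs) q.2 : Int)) then
              results ++ [pvFenQueryLoop (pvTreeAfterUpdates logs) 0 (PySem.List.bisectRight (pvUniqueDates logs) q.2 : Int) -
                pvFenQueryLoop (pvTreeAfterUpdates logs) 0 ((PySem.List.bisectLeft (pvUniqueDates logs) q.1 : Int) + 1 - 1)]
            else results ++ [0]) [] := rfl
    rw [h0, pvFoldIf]
  have hB : process_maintenance_logs_alt logs queries
      = queries.map (fun q =>
          if PySem.List.bisectLeft (pvUniqueDates logs) q.1 < PySem.List.bisectRight (pvUniqueDates logs) q.2 then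
            PySem.List.pyGetD (pvPrefix logs) ((PySem.List.bisectRight (pvUniqueDates logs) q.2 : Nat) : Int) 0 -
            PySem.List.pyGetD (pvPrefix logs) ((PySem.List.bisectLeft (pvUniqueDates logs) q.1 : Nat) : Int) 0
          else 0) := by
    unfold process_maintenance_logs_alt
    rw [hdates]
  rw [hA, hB]
  apply List.map_congr_left
  intro q _
  have hble : PySem.List.bisectLeft (pvUniqueDates logs) q.1 ≤ (pvUniqueDates logs).length :=
    pvBisectLeft_le _ _
  have hbre : PySem.List.bisectRight (pvUniqueDates logs) q.2 ≤ (pvUniqueDates logs).length :=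
    pvBisectRight_le _ _
  by_cases hlt : PySem.List.bisectLeft (pvUniqueDates logs) q.1 < PySem.List.bisectRight (pvUniqueDates logs) q.2
  · rw [if_pos (by constructor <;> push_cast <;> omega), if_pos hlt]
    have e : ((PySem.List.bisectLeft (pvUniqueDates logs) q.1 : Int) + 1 - 1)
        = ((PySem.List.bisectLeft (pvUniqueDates logs) q.1 : Nat) : Int) := by ring
    rw [e]
    rw [hquery _ hbre, hquery _ (by omega)]
    rw [PySem.List.pyGetD_natCast, PySem.List.pyGetD_natCast]
    rw [List.getD_eq_getElem?_getD, ← List.getD_eq_getElem?_getD]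
    rw [List.getD_eq_getElem?_getD, ← List.getD_eq_getElem?_getD]
    rw [hpref _ hbre, hpref _ (by omega)]
  · rw [if_neg (by push_cast; omega), if_neg hlt]
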